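-- pv_equiv track=rewrite | github.com/nga-27/SecuritiesAnalysisTools | libs/tools/resistance_support.py | colorize_plots
-- ===== SOURCE A (Python) =====
-- def colorize_plots(len_of_plots: int, primary_plot_index: int = None) -> list:
--     """Colorize Plots
--
--     Arguments:
--         len_of_plots {int}
--
--     Keyword Arguments:
--         primary_plot_index {int} -- used for plotting price itself (default: {None})
--
--     Returns:
--         list -- list of colors
--     """
--     num_colors = 6
--     colors = []
--
--     for i in range(len_of_plots):
--         if i % num_colors == 1:
--             colors.append('purple')
--         elif i % num_colors == 2:
--             colors.append('blue')
--         elif i % num_colors == 3: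
--             colors.append('green')
--         elif i % num_colors == 4:
--             colors.append('yellow')
--         elif i % num_colors == 5:
--             colors.append('orange')
--         elif i % num_colors == 0:
--             colors.append('red')
--
--     if primary_plot_index is not None:
--         colors[primary_plot_index] = 'black'
--
--     return colors
-- ===== SOURCE B (Python) =====
-- def colorize_plots(len_of_plots: int, primary_plot_index: int = None) -> list:
--     palette = ['red', 'purple', 'blue', 'green', 'yellow', 'orange']
--     n = max(len_of_plots, 0)
--     colors = (palette * (n // 6 + 1))[:n]
--     if primary_plot_index is not None:
--         colors[primary_plot_index] = 'black'
--     return colors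
-- ===== Notes on version B (the rewrite author's own statement) =====
-- stated objective: simpler
-- what changed: Replaces the per-index loop with a six-way if/elif cascade by tiling the 6-color palette via list repetition and slicing it to length; the primary-index blackout assignment is kept.
import Mathlib
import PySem

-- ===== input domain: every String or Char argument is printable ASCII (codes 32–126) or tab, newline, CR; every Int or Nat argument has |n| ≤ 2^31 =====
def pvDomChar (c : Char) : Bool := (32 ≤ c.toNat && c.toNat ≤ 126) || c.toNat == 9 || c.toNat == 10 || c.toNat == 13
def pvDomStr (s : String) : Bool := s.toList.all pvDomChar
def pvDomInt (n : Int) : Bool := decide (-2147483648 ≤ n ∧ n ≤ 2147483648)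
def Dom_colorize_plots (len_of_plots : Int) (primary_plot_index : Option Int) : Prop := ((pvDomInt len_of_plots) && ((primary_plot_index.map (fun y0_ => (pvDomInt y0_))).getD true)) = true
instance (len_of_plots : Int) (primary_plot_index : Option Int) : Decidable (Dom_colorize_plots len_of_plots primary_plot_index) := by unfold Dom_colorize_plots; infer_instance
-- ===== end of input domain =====

-- ===== PORT A =====
-- ===== PORT A =====
-- B tiles the palette by list-repetition-and-slice instead of A's per-index if/elif loop (objective: simpler).
-- Pre_ excludes the inputs where both Pythons raise IndexError on colors[primary_plot_index] = 'black'.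
def colorize_plots (len_of_plots : Int) (primary_plot_index : Option Int) : List String :=
  let colors := (PySem.List.pyRange 0 len_of_plots 1).foldl (fun colors i =>
    if PySem.Int.mod i 6 = 1 then colors ++ ["purple"]
    else if PySem.Int.mod i 6 = 2 then colors ++ ["blue"]
    else if PySem.Int.mod i 6 = 3 then colors ++ ["green"]
    else if PySem.Int.mod i 6 = 4 then colors ++ ["yellow"]
    else if PySem.Int.mod i 6 = 5 then colors ++ ["orange"]
    else if PySem.Int.mod i 6 = 0 then colors ++ ["red"]
    else colors) []
  match primary_plot_index with
  | none => colors
  | some i => PySem.List.pySetD colors i "black"   -- total under Pre_ (InRange)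

-- ===== PORT B =====
def colorize_plots_alt (len_of_plots : Int) (primary_plot_index : Option Int) : List String :=
  let palette := ["red", "purple", "blue", "green", "yellow", "orange"]
  let n := max len_of_plots 0
  -- palette * (n // 6 + 1) then [:n]; n ≥ 0 so // is / and the slice is take — exact
  let colors := (List.flatten (List.replicate (PySem.Int.floordiv n 6 + 1).toNat palette)).take n.toNat
  match primary_plot_index with
  | some i => PySem.List.pySetD colors i "black"
  | none => colors

-- ===== PRECONDITION & SPEC =====
-- Pre_ excludes exactly the inputs where A (and B) raise IndexError: a primary index outside the built list.
def Pre_colorize_plots (len_of_plots : Int) (primary_plot_index : Option Int) : Prop :=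
  match primary_plot_index with
  | none => True
  | some i => -(max len_of_plots 0) ≤ i ∧ i < max len_of_plots 0
instance (len_of_plots : Int) (primary_plot_index : Option Int) : Decidable (Pre_colorize_plots len_of_plots primary_plot_index) := by unfold Pre_colorize_plots; cases primary_plot_index <;> infer_instance
def pvWitness_colorize_plots : Int × Option Int := (7, some 2)
def Spec_colorize_plots (len_of_plots : Int) (primary_plot_index : Option Int) (out : List String) : Prop := out = colorize_plots_alt len_of_plots primary_plot_index
instance (len_of_plots : Int) (primary_plot_index : Option Int) (out : List String) : Decidable (Spec_colorize_plots len_of_plots primary_plot_index out) := by unfold Spec_colorize_plots; infer_instance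

-- ===== CLAIM (what is proved, stated in full; the proofs are below) =====
def Claim_equal_colorize_plots : Prop := ∀ (len_of_plots : Int) (primary_plot_index : Option Int), Dom_colorize_plots len_of_plots primary_plot_index → Pre_colorize_plots len_of_plots primary_plot_index → Spec_colorize_plots len_of_plots primary_plot_index (colorize_plots len_of_plots primary_plot_index)

-- ===== LEMMAS AND PROOFS =====

-- the palette, proof-side name
def pvPalette : List String := ["red", "purple", "blue", "green", "yellow", "orange"]

-- one step of A's cascade as a function of the residue
lemma pv_cascade_eq (i : Int) (hi : 0 ≤ i) (colors : List String) :
    (if PySem.Int.mod i 6 = 1 then colors ++ ["purple"]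
     else if PySem.Int.mod i 6 = 2 then colors ++ ["blue"]
     else if PySem.Int.mod i 6 = 3 then colors ++ ["green"]
     else if PySem.Int.mod i 6 = 4 then colors ++ ["yellow"]
     else if PySem.Int.mod i 6 = 5 then colors ++ ["orange"]
     else if PySem.Int.mod i 6 = 0 then colors ++ ["red"]
     else colors)
    = colors ++ [pvPalette.getD (i.toNat % 6) ""] := by
  obtain ⟨m, rfl⟩ := Int.eq_ofNat_of_zero_le hi
  have h : PySem.Int.mod (m : Int) 6 = ((m % 6 : Nat) : Int) := by
    exact_mod_cast PySem.Int.mod_natCast m 6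
  have h6 : m % 6 < 6 := Nat.mod_lt _ (by omega)
  have : m % 6 = 0 ∨ m % 6 = 1 ∨ m % 6 = 2 ∨ m % 6 = 3 ∨ m % 6 = 4 ∨ m % 6 = 5 := by omega
  rcases this with h0|h0|h0|h0|h0|h0 <;> rw [h, h0] <;> norm_num [pvPalette] <;> simp [h0]

-- A's loop builds the map of residue colors over range
lemma pv_loopA (n : Nat) :
    (PySem.List.pyRange 0 (n : Int) 1).foldl (fun colors i =>
      if PySem.Int.mod i 6 = 1 then colors ++ ["purple"]
      else if PySem.Int.mod i 6 = 2 then colors ++ ["blue"]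
      else if PySem.Int.mod i 6 = 3 then colors ++ ["green"]
      else if PySem.Int.mod i 6 = 4 then colors ++ ["yellow"]
      else if PySem.Int.mod i 6 = 5 then colors ++ ["orange"]
      else if PySem.Int.mod i 6 = 0 then colors ++ ["red"]
      else colors) []
    = (List.range n).map (fun k => pvPalette.getD (k % 6) "") := by
  induction n with
  | zero => simp [PySem.List.pyRange_one_eq_nil]
  | succ n ih =>
    have hcast : ((n + 1 : Nat) : Int) = (n : Int) + 1 := by push_cast; ring
    rw [hcast, PySem.List.pyRange_one_succ_right (by positivity), List.foldl_append,
        List.foldl_cons, List.foldl_nil, ih, pv_cascade_eq (n : Int) (by positivity),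
        List.range_succ, List.map_append]
    simp

-- B's tile-and-slice is the same map
lemma pv_tileB (n : Nat) :
    (List.flatten (List.replicate (n / 6 + 1) pvPalette)).take n
    = (List.range n).map (fun k => pvPalette.getD (k % 6) "") := by
  have hflat : ∀ k : Nat, List.flatten (List.replicate k pvPalette)
      = (List.range (6 * k)).map (fun i => pvPalette.getD (i % 6) "") := by
    intro k
    induction k with
    | zero => simp
    | succ k ih =>
      rw [List.replicate_succ', List.flatten_append, ih,
          show 6 * (k + 1) = 6 * k + 6 by ring, List.range_add, List.map_append]
      simp [List.range_succ, pvPalette]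
  rw [hflat]
  have hmin : min n (6 * (n / 6 + 1)) = n := by omega
  rw [← List.map_take, List.take_range, hmin]

-- ===== VERDICT (by name: the statement is the Claim_ definition above) =====
lemma pv_colors_eq (len : Int) :
    (PySem.List.pyRange 0 len 1).foldl (fun colors i =>
      if PySem.Int.mod i 6 = 1 then colors ++ ["purple"]
      else if PySem.Int.mod i 6 = 2 then colors ++ ["blue"]
      else if PySem.Int.mod i 6 = 3 then colors ++ ["green"]
      else if PySem.Int.mod i 6 = 4 then colors ++ ["yellow"]
      else if PySem.Int.mod i 6 = 5 then colors ++ ["orange"]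
      else if PySem.Int.mod i 6 = 0 then colors ++ ["red"]
      else colors) []
    = (List.flatten (List.replicate (PySem.Int.floordiv (max len 0) 6 + 1).toNat pvPalette)).take (max len 0).toNat := by
  set n : Nat := (max len 0).toNat with hn
  have hmax : max len 0 = (n : Int) := by omega
  have hrange : PySem.List.pyRange 0 len 1 = PySem.List.pyRange 0 (n : Int) 1 := by
    by_cases h : len ≤ 0
    · rw [PySem.List.pyRange_one_eq_nil h, PySem.List.pyRange_one_eq_nil (by omega)]
    · congr 1; omega
  have hdiv : (PySem.Int.floordiv (max len 0) 6 + 1).toNat = n / 6 + 1 := by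
    rw [hmax]
    have : PySem.Int.floordiv (n : Int) 6 = ((n / 6 : Nat) : Int) := by
      exact_mod_cast PySem.Int.floordiv_natCast n 6
    rw [this]; omega
  rw [hrange, hdiv, pv_loopA, pv_tileB]

theorem colorize_plots_spec : Claim_equal_colorize_plots := by
  intro len p _ _
  unfold Spec_colorize_plots colorize_plots colorize_plots_alt
  cases p <;> simp only [pv_colors_eq, pvPalette]
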